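-- pv_equiv track=rewrite | github.com/majstenmark/kattis | alicedigital.py | solve
-- ===== SOURCE A (Python) =====
-- def solve(Ns, M):
--     li = [0, 0]
--     seenM = 0
--     mx = 0
--     for i in Ns:
--         if i > M:
--             li[seenM] += i
--         elif i == M:
--             if seenM :
--                 alt = li[0] + M + li[1]
--                 mx = max(mx,alt)
--             li = [li[seenM], 0]
--             seenM = 1
--         else:
--             #i < M
--             if seenM == 1:
--                 alt = li[0] + M + li[1]
--                 mx = max(mx,alt)
--             seenM = 0
--             li = [0, 0]
--     if seenM  == 1:
--
--         alt = li[0] + M + li[1]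
--         mx = max(mx,alt)
--     return mx
-- ===== SOURCE B (Python) =====
-- def solve(Ns, M):
--     # prefix run-sums: L[i] = sum of the maximal run of elements > M ending just before index i
--     L = [0]
--     acc = 0
--     for x in Ns:
--         acc = acc + x if x > M else 0
--         L.append(acc)
--     # suffix run-sums: after reversing, R[i] = sum of the maximal run of elements > M starting at index i
--     R = [0]
--     acc = 0
--     for x in reversed(Ns):
--         acc = acc + x if x > M else 0
--         R.append(acc)
--     R.reverse()
--     best = 0
--     for x, l, r in zip(Ns, L, R[1:]):
--         if x == M:
--             best = max(best, l + M + r)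
--     return best
-- ===== Notes on version B (the rewrite author's own statement) =====
-- stated objective: alternative
-- what changed: A's single stateful pass (a two-slot li accumulator, a seenM flag and a running max mutated per element) is replaced by three plain passes: build prefix >M-run sums, build suffix >M-run sums from the reversed list, then scan the M positions combining left-run + M + right-run into the max.
import Mathlib
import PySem

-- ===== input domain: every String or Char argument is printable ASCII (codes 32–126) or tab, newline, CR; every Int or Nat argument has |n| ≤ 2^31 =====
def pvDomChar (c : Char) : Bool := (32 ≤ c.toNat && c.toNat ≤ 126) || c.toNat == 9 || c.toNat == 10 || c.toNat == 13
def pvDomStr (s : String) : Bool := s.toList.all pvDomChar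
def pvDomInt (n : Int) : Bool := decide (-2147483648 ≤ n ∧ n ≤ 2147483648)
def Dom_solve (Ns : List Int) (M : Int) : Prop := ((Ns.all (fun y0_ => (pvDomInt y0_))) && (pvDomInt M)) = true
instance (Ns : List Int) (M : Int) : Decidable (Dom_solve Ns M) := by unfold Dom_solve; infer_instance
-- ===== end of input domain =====

-- B replaces A's single stateful pass (li pair + seenM flag + running max) by three plain passes:
-- prefix >M-run sums, suffix >M-run sums, then a scan over the M positions; same O(n) cost ("alternative").

-- ===== PORT A =====
-- A's loop: state li = (li0, li1), seenM ∈ {0,1}, mx; branches in A's order.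
def loopA (M : Int) (li : Int × Int) (seenM : Int) (mx : Int) : List Int → Int
  | [] => if seenM = 1 then max mx (li.1 + M + li.2) else mx
  | i :: rest =>
    if i > M then
      loopA M (if seenM = 0 then (li.1 + i, li.2) else (li.1, li.2 + i)) seenM mx rest
    else if i = M then
      if seenM ≠ 0 then
        loopA M (li.2, 0) 1 (max mx (li.1 + M + li.2)) rest
      else
        loopA M (li.1, 0) 1 mx rest
    else
      if seenM = 1 then
        loopA M (0, 0) 0 (max mx (li.1 + M + li.2)) rest
      else
        loopA M (0, 0) 0 mx rest

def solve (Ns : List Int) (M : Int) : Int := loopA M (0, 0) 0 0 Ns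

-- ===== PORT B =====
-- Source B's "acc = acc + x if x > M else 0"
def pvF (M a x : Int) : Int := if x > M then a + x else 0
-- Source B's loop body building a run-sum list: append the new acc, carry it
def pvStep2 (M : Int) (p : List Int × Int) (x : Int) : List Int × Int :=
  let a := pvF M p.2 x
  (p.1 ++ [a], a)

def solve_alt (Ns : List Int) (M : Int) : Int :=
  let L := (Ns.foldl (pvStep2 M) ([0], 0)).1
  let R := ((Ns.reverse.foldl (pvStep2 M) ([0], 0)).1).reverse
  (Ns.zip (L.zip (R.drop 1))).foldl
    (fun best t => if t.1 = M then max best (t.2.1 + M + t.2.2) else best) 0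

-- ===== PRECONDITION & SPEC =====
def Spec_solve (Ns : List Int) (M : Int) (out : Int) : Prop := out = solve_alt Ns M
instance (Ns : List Int) (M : Int) (out : Int) : Decidable (Spec_solve Ns M out) := by unfold Spec_solve; infer_instance

-- ===== CLAIM (what is proved, stated in full; the proofs are below) =====
def Claim_equal_solve : Prop := ∀ (Ns : List Int) (M : Int), Dom_solve Ns M → Spec_solve Ns M (solve Ns M)

-- ===== LEMMAS AND PROOFS =====

-- sum of the maximal leading run of elements > M
def pvLead (M : Int) : List Int → Int
  | [] => 0
  | x :: xs => if x > M then x + pvLead M xs else 0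

-- reference function: max 0 (max over M-positions of left-run + M + right-run)
def pvGo (M left : Int) : List Int → Int
  | [] => 0
  | x :: xs =>
    if x > M then pvGo M (left + x) xs
    else if x = M then max (left + M + pvLead M xs) (pvGo M 0 xs)
    else pvGo M 0 xs

-- suffix run-sum list: (pvRL M l)[i] = pvLead M (l.drop i), length l.length+1
def pvRL (M : Int) : List Int → List Int
  | [] => [0]
  | x :: xs => pvLead M (x :: xs) :: pvRL M xs

-- recursive form of B's final zip-scan
def pvZ (M a mx : Int) : List Int → Int
  | [] => mx
  | x :: xs => pvZ M (pvF M a x) (if x = M then max mx (a + M + pvLead M xs) else mx) xs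

theorem pvGo_nonneg (M left : Int) (l : List Int) : 0 ≤ pvGo M left l := by
  induction l generalizing left with
  | nil => simp [pvGo]
  | cons x xs ih =>
    simp only [pvGo]
    split_ifs with h1 h2
    · exact ih _
    · exact le_trans (ih 0) (le_max_right _ _)
    · exact ih 0

theorem scanl_cons_drop (M b : Int) (l : List Int) :
    List.scanl (pvF M) b l = b :: (List.scanl (pvF M) b l).drop 1 := by
  cases l <;> simp

-- Source B's run-sum building loop produces (pre ++ tail of a scanl, final acc)
theorem foldl_step2 (M : Int) (l pre : List Int) (a : Int) :
    l.foldl (pvStep2 M) (pre, a)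
      = (pre ++ (List.scanl (pvF M) a l).drop 1, l.foldl (pvF M) a) := by
  induction l generalizing pre a with
  | nil => simp
  | cons x xs ih =>
    simp only [List.foldl_cons, List.scanl_cons, pvStep2, ih, List.drop_succ_cons,
      List.append_assoc, List.drop_zero]
    rw [scanl_cons_drop]
    simp

theorem lead_foldl_rev (M : Int) (l : List Int) :
    l.reverse.foldl (pvF M) 0 = pvLead M l := by
  induction l with
  | nil => simp [pvLead]
  | cons x xs ih =>
    simp only [List.reverse_cons, List.foldl_append, List.foldl_cons, List.foldl_nil, ih]
    simp only [pvF, pvLead]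
    split_ifs <;> ring

theorem pvLead_cons (M x : Int) (xs : List Int) :
    pvLead M (x :: xs) = pvF M (pvLead M xs) x := by
  simp only [pvLead, pvF]; split_ifs <;> ring

theorem buildR_eq (M : Int) (l : List Int) :
    ((l.reverse.foldl (pvStep2 M) ([0], 0)).1).reverse = pvRL M l := by
  induction l with
  | nil => simp [pvRL]
  | cons x xs ih =>
    rw [List.reverse_cons, List.foldl_append, List.foldl_cons, List.foldl_nil,
      foldl_step2 M xs.reverse [(0 : Int)] 0]
    simp only [pvStep2, lead_foldl_rev]
    rw [foldl_step2 M xs.reverse [(0 : Int)] 0] at ih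
    simp only [List.reverse_append, List.reverse_cons, List.reverse_nil,
      List.nil_append, List.singleton_append] at ih ⊢
    rw [pvRL, ← pvLead_cons, ih]

theorem pvRL_head_drop (M : Int) (l : List Int) :
    pvRL M l = pvLead M l :: (pvRL M l).drop 1 := by
  cases l <;> simp [pvRL, pvLead]

theorem zip_fold_eq_pvZ (M : Int) (l : List Int) (a mx : Int) :
    (l.zip ((List.scanl (pvF M) a l).zip ((pvRL M l).drop 1))).foldl
      (fun best t => if t.1 = M then max best (t.2.1 + M + t.2.2) else best) mx
      = pvZ M a mx l := by
  induction l generalizing a mx with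
  | nil => simp [pvZ]
  | cons x xs ih =>
    rw [List.scanl_cons]
    have h1 : (pvRL M (x :: xs)).drop 1 = pvRL M xs := rfl
    rw [h1, pvRL_head_drop M xs]
    simp only [List.zip_cons_cons, List.foldl_cons]
    simp only [pvZ]
    exact ih _ _

theorem pvZ_eq_go (M : Int) (l : List Int) (a mx : Int) (hmx : 0 ≤ mx) :
    pvZ M a mx l = max mx (pvGo M a l) := by
  induction l generalizing a mx with
  | nil => simp [pvZ, pvGo]; omega
  | cons x xs ih =>
    simp only [pvZ, pvGo, pvF]
    by_cases h1 : x > M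
    · have hne : ¬ x = M := by omega
      simp only [if_pos h1, if_neg hne]
      exact ih _ _ hmx
    · by_cases h2 : x = M
      · simp only [if_neg h1, if_pos h2]
        rw [ih _ _ (le_trans hmx (le_max_left _ _)), max_assoc]
      · simp only [if_neg h1, if_neg h2]
        exact ih _ _ hmx

-- A's loop equals pvGo (seen = 0 case) / the pending-window form (seen = 1 case)
theorem loopA_go (M : Int) (l : List Int) :
    (∀ l0 l1 mx, 0 ≤ mx → loopA M (l0, l1) 0 mx l = max mx (pvGo M l0 l)) ∧
    (∀ l0 l1 mx, 0 ≤ mx → loopA M (l0, l1) 1 mx l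
        = max mx (max (l0 + M + l1 + pvLead M l) (pvGo M l1 l))) := by
  induction l with
  | nil =>
    constructor <;> intro l0 l1 mx hmx <;> simp [loopA, pvGo, pvLead] <;> omega
  | cons x xs ih =>
    obtain ⟨ih0, ih1⟩ := ih
    constructor
    · intro l0 l1 mx hmx
      simp only [loopA, pvGo]
      by_cases h1 : x > M
      · have hne : ¬ x = M := by omega
        simp only [if_pos h1, if_neg hne]
        norm_num
        exact ih0 _ l1 mx hmx
      · by_cases h2 : x = M
        · simp only [if_neg h1, if_pos h2]
          norm_num
          rw [ih1 l0 0 mx hmx]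
          norm_num
        · simp only [if_neg h1, if_neg h2]
          norm_num
          exact ih0 0 0 mx hmx
    · intro l0 l1 mx hmx
      simp only [loopA, pvGo, pvLead]
      by_cases h1 : x > M
      · have hne : ¬ x = M := by omega
        simp only [if_pos h1, if_neg hne]
        norm_num
        rw [ih1 l0 (l1 + x) mx hmx]
        have he : l0 + M + (l1 + x) + pvLead M xs = l0 + M + l1 + (x + pvLead M xs) := by ring
        rw [he]
      · by_cases h2 : x = M
        · simp only [if_neg h1, if_pos h2]
          norm_num
          rw [ih1 l1 0 (max mx (l0 + M + l1)) (le_trans hmx (le_max_left _ _))]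
          rw [max_assoc]
          norm_num
        · simp only [if_neg h1, if_neg h2]
          norm_num
          rw [ih0 0 0 (max mx (l0 + M + l1)) (le_trans hmx (le_max_left _ _))]
          rw [max_assoc]

theorem solve_eq_go (Ns : List Int) (M : Int) : solve Ns M = pvGo M 0 Ns := by
  unfold solve
  rw [(loopA_go M Ns).1 0 0 0 le_rfl]
  exact max_eq_right (pvGo_nonneg M 0 Ns)

theorem solve_alt_eq_go (Ns : List Int) (M : Int) : solve_alt Ns M = pvGo M 0 Ns := by
  unfold solve_alt
  rw [foldl_step2 M Ns [(0 : Int)] 0, buildR_eq M Ns]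
  simp only [List.singleton_append]
  rw [← scanl_cons_drop M 0 Ns, zip_fold_eq_pvZ M Ns 0 0, pvZ_eq_go M Ns 0 0 le_rfl]
  exact max_eq_right (pvGo_nonneg M 0 Ns)

-- ===== VERDICT (by name: the statement is the Claim_ definition above) =====
theorem solve_spec : Claim_equal_solve := by
  intro Ns M _
  unfold Spec_solve
  rw [solve_eq_go, solve_alt_eq_go]
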